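-- pv_equiv track=rewrite | github.com/aarush2612/kelp-automated-dealflow | src/ingestion/markdown_reader.py | _extract_swot
-- ===== SOURCE A (Python) =====
-- from typing import Dict, Any, List
--
-- def _extract_swot(sections: Dict[str, str]) -> Dict[str, List[str]]:
--     swot = {}
--     swot_block = sections.get("SWOT", "")
--     current = None
--     buffer = []
--
--     for line in swot_block.splitlines():
--         if line.startswith("### "):
--             if current:
--                 swot[current] = buffer
--             current = line.replace("### ", "").strip()
--             buffer = []
--         elif line.strip().startswith("-"):
--             buffer.append(line.replace("-", "").strip())
--
--     if current:
--         swot[current] = buffer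
--
--     return swot
-- ===== SOURCE B (Python) =====
-- def _extract_swot(sections):
--     lines = sections.get("SWOT", "").splitlines()
--     result = {}
--     for header, body in _segments(lines):
--         name = header.replace("### ", "").strip()
--         if name:
--             result[name] = [l.replace("-", "").strip() for l in body if l.strip().startswith("-")]
--     return result
--
-- def _segments(lines):
--     # split lines into (header_line, following_lines) groups at '### ' boundaries
--     if not lines:
--         return []
--     first, rest = lines[0], lines[1:]
--     if not first.startswith("### "):
--         return _segments(rest)
--     k = 0
--     while k < len(rest) and not rest[k].startswith("### "):
--         k += 1
--     return [(first, rest[:k])] + _segments(rest[k:])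
-- ===== Notes on version B (the rewrite author's own statement) =====
-- stated objective: alternative
-- what changed: Replaces A's single pass with mutable current/buffer state by a segment-then-map decomposition: recursively split the lines into (header, body) groups at '### ' boundaries, then build the dict from each group with a filter/map comprehension for the bullets.
import Mathlib
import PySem

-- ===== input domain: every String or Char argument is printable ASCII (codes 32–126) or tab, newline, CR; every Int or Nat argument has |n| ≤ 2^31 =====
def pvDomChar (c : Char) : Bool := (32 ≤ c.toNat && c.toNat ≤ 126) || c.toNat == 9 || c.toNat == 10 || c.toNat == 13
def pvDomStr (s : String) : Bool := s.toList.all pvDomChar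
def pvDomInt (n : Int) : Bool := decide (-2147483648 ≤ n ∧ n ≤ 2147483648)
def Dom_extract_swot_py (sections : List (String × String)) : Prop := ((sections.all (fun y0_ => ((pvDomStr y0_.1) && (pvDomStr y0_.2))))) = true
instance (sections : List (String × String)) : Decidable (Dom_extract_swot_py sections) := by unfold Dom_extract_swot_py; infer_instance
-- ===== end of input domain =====

-- B parses the SWOT block by first splitting the lines into (header, body) segments and then
-- mapping each segment to its dict entry, instead of A's one-pass mutable current/buffer state.

-- ===== PORT A =====
-- 'if current: swot[current] = buffer' (Python truthiness: current is neither None nor "")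
def swotFinish (st : PySem.Dict String (List String) × Option String × List String) :
    PySem.Dict String (List String) :=
  match st.2.1 with
  | some c => if c ≠ "" then st.1.insert c st.2.2 else st.1
  | none => st.1

def swotStep (st : PySem.Dict String (List String) × Option String × List String) (line : String) :
    PySem.Dict String (List String) × Option String × List String :=
  if PySem.Str.startswith line "### " then
    (swotFinish st, some (PySem.Str.strip (PySem.Str.replace line "### " "")), [])
  else if PySem.Str.startswith (PySem.Str.strip line) "-" then
    (st.1, st.2.1, st.2.2 ++ [PySem.Str.strip (PySem.Str.replace line "-" "")])
  else st

def extract_swot_py (sections : List (String × String)) : List (String × List String) :=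
  let swot_block := (PySem.Dict.mk sections).getD "SWOT" ""
  let st := (PySem.Str.splitlines swot_block).foldl swotStep (PySem.Dict.empty, none, [])
  (swotFinish st).items

-- ===== PORT B =====
def swotIsHeader (l : String) : Bool := PySem.Str.startswith l "### "

-- '[l.replace("-", "").strip() for l in body if l.strip().startswith("-")]'
def swotBullets (body : List String) : List String :=
  (body.filter (fun l => PySem.Str.startswith (PySem.Str.strip l) "-")).map
    (fun l => PySem.Str.strip (PySem.Str.replace l "-" ""))

-- '_segments': rest[:k] / rest[k:] with k the first header index = takeWhile / dropWhile
def swotSegments : List String → List (String × List String)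
  | [] => []
  | first :: rest =>
    if swotIsHeader first then
      (first, rest.takeWhile (fun x => !swotIsHeader x)) ::
        swotSegments (rest.dropWhile (fun x => !swotIsHeader x))
    else swotSegments rest
termination_by l => l.length
decreasing_by
  · have := List.length_dropWhile_le (fun x => !swotIsHeader x) rest
    simp; omega
  · simp

def swotStepB (result : PySem.Dict String (List String)) (hb : String × List String) :
    PySem.Dict String (List String) :=
  let name := PySem.Str.strip (PySem.Str.replace hb.1 "### " "")
  if name ≠ "" then result.insert name (swotBullets hb.2) else result

def extract_swot_py_alt (sections : List (String × String)) : List (String × List String) :=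
  let lines := PySem.Str.splitlines ((PySem.Dict.mk sections).getD "SWOT" "")
  ((swotSegments lines).foldl swotStepB PySem.Dict.empty).items

-- ===== PRECONDITION & SPEC =====
def Spec_extract_swot_py (sections : List (String × String)) (out : List (String × List String)) : Prop := out = extract_swot_py_alt sections
instance (sections : List (String × String)) (out : List (String × List String)) : Decidable (Spec_extract_swot_py sections out) := by unfold Spec_extract_swot_py; infer_instance

-- ===== CLAIM (what is proved, stated in full; the proofs are below) =====
def Claim_equal_extract_swot_py : Prop := ∀ (sections : List (String × String)), Dom_extract_swot_py sections → Spec_extract_swot_py sections (extract_swot_py sections)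

-- ===== LEMMAS AND PROOFS =====
lemma swotBullets_nil : swotBullets [] = [] := rfl

lemma swotBullets_cons (x : String) (xs : List String) :
    swotBullets (x :: xs) = swotBullets [x] ++ swotBullets xs := by
  simp only [swotBullets, List.filter_cons]
  split <;> simp

lemma swotSegments_cons_header (l : String) (rest : List String) (h : swotIsHeader l = true) :
    swotSegments (l :: rest) =
      (l, rest.takeWhile (fun x => !swotIsHeader x)) ::
        swotSegments (rest.dropWhile (fun x => !swotIsHeader x)) := by
  rw [swotSegments]; simp [h]

lemma swotSegments_skip (l : String) (rest : List String) (h : swotIsHeader l = false) :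
    swotSegments (l :: rest) = swotSegments rest := by
  rw [swotSegments]; simp [h]

lemma swotSegments_dropWhile (ls : List String) :
    swotSegments (ls.dropWhile (fun x => !swotIsHeader x)) = swotSegments ls := by
  induction ls with
  | nil => rfl
  | cons l rest ih =>
    by_cases h : swotIsHeader l
    · simp [List.dropWhile, h]
    · simp only [List.dropWhile, h]
      rw [swotSegments_skip l rest (by simp [h])]
      simpa using ih

lemma swot_main (n : Nat) : ∀ lines : List String, lines.length ≤ n →
    ∀ (d : PySem.Dict String (List String)) (cur : Option String) (buf : List String),
    swotFinish (lines.foldl swotStep (d, cur, buf)) =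
      (swotSegments lines).foldl swotStepB
        (swotFinish (d, cur, buf ++ swotBullets (lines.takeWhile (fun x => !swotIsHeader x)))) := by
  induction n with
  | zero =>
    intro lines hlen d cur buf
    have : lines = [] := List.eq_nil_of_length_eq_zero (Nat.le_zero.mp hlen)
    subst this
    simp [swotSegments, swotBullets]
  | succ m ih =>
    intro lines hlen d cur buf
    cases lines with
    | nil => simp [swotSegments, swotBullets]
    | cons l rest =>
      by_cases hl : swotIsHeader l
      · -- header line: flush the current buffer, start a new section
        have hstep : swotStep (d, cur, buf) l =
            (swotFinish (d, cur, buf), some (PySem.Str.strip (PySem.Str.replace l "### " "")), []) := by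
          simp [swotStep, swotIsHeader] at hl ⊢; simp [hl]
        rw [List.foldl_cons, hstep,
          ih rest (by simpa using Nat.lt_succ_iff.mp hlen) _ _ _]
        rw [swotSegments_cons_header l rest hl, swotSegments_dropWhile]
        have hx : swotStepB (swotFinish (d, cur, buf))
            (l, rest.takeWhile (fun x => !swotIsHeader x)) =
            swotFinish (swotFinish (d, cur, buf),
              some (PySem.Str.strip (PySem.Str.replace l "### " "")),
              swotBullets (rest.takeWhile (fun x => !swotIsHeader x))) := by
          simp only [swotStepB, swotFinish]
        simp only [List.foldl_cons, List.takeWhile_cons, hl, Bool.not_true,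
          Bool.false_eq_true, if_false, swotBullets_nil, List.append_nil, List.nil_append, hx]
      · -- non-header line: only the buffer may grow
        have hstep : swotStep (d, cur, buf) l = (d, cur, buf ++ swotBullets [l]) := by
          simp [swotStep, swotIsHeader, swotBullets] at hl ⊢
          simp [hl]
          by_cases hb : PySem.Chars.startswith (PySem.Chars.strip l.toList) ['-']
          · simp [hb]
          · simp [hb]
        rw [List.foldl_cons, hstep,
          ih rest (by simpa using Nat.lt_succ_iff.mp hlen) _ _ _]
        rw [swotSegments_skip l rest (by simpa using hl)]
        have hnl : (!swotIsHeader l) = true := by simp [hl]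
        simp only [List.takeWhile_cons, hnl, if_true]
        conv_rhs => rw [swotBullets_cons]
        rw [List.append_assoc]

-- ===== VERDICT (by name: the statement is the Claim_ definition above) =====
theorem extract_swot_py_spec : Claim_equal_extract_swot_py := by
  intro sections _
  unfold Spec_extract_swot_py extract_swot_py extract_swot_py_alt
  have h := swot_main (PySem.Str.splitlines ((PySem.Dict.mk sections).getD "SWOT" "")).length
    (PySem.Str.splitlines ((PySem.Dict.mk sections).getD "SWOT" "")) le_rfl
    PySem.Dict.empty none []
  exact congrArg PySem.Dict.items h
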